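-- pv_equiv track=rewrite | github.com/NaSchwartz/EscapeRoom | deck_tools.py | deal_whole_deck
-- ===== SOURCE A (Python) =====
-- def deal_whole_deck(hand_count : int, deck):
--     hands = [[] for i in range(hand_count)]
--     ptmp = 0
--     while True:
--         if deck == []:
--             break
--         hands[ptmp].append(deck.pop(0))
--         ptmp = (ptmp + 1) % hand_count
--
--     return hands
-- ===== SOURCE B (Python) =====
-- # B: builds each hand as a stride slice deck[i::hand_count] -- O(n) total instead of
-- # A's O(n^2) pop(0) loop.  Note: A empties `deck` in place; B does not mutate it
-- # (the equivalence claimed is about the return value only).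
-- def deal_whole_deck(hand_count: int, deck):
--     return [deck[i::hand_count] for i in range(hand_count)]
-- ===== Notes on version B (the rewrite author's own statement) =====
-- stated objective: faster
-- what changed: Replaces the destructive while-loop that pops deck[0] one card at a time into round-robin hands with a list of stride slices deck[i::hand_count]; B does not mutate deck (A empties it), the return value is identical.
import Mathlib
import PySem

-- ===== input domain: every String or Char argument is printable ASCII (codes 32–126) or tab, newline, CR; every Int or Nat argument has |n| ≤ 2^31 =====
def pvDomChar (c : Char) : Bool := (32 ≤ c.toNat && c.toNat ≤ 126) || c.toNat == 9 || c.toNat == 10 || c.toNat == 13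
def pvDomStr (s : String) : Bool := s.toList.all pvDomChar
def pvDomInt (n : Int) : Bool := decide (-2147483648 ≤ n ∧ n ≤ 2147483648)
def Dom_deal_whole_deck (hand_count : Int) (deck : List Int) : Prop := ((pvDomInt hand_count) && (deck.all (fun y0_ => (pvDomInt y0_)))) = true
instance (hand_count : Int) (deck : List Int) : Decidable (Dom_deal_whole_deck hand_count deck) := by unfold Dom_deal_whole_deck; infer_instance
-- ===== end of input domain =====

-- B deals the deck as one stride slice deck[i::hand_count] per hand instead of A's
-- destructive pop(0) round-robin loop; return values agree on Pre_ (A also empties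
-- `deck` in place, B does not mutate it — only the return value is claimed).

-- ===== PORT A =====
-- the while-loop: pops the head of deck, appends it to hands[ptmp], steps ptmp = (ptmp+1) % hand_count
def dealWholeDeckLoop (hand_count : Int) (hands : List (List Int)) (ptmp : Int) (deck : List Int) : List (List Int) :=
  match deck with
  | [] => hands
  | c :: rest =>
      dealWholeDeckLoop hand_count
        (PySem.List.pySetD hands ptmp (PySem.List.pyGetD hands ptmp [] ++ [c]))
        (PySem.Int.mod (ptmp + 1) hand_count) rest

def deal_whole_deck (hand_count : Int) (deck : List Int) : List (List Int) :=
  dealWholeDeckLoop hand_count ((PySem.List.pyRange 0 hand_count 1).map (fun _ => ([] : List Int))) 0 deck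

-- ===== PORT B =====
def deal_whole_deck_alt (hand_count : Int) (deck : List Int) : List (List Int) :=
  (PySem.List.pyRange 0 hand_count 1).map
    (fun i => (PySem.List.slice? deck (some i) none hand_count).getD [])

-- ===== PRECONDITION & SPEC =====
-- Pre_ excludes exactly the inputs on which A raises: hand_count ≤ 0 with a nonempty deck
-- (hands[0].append hits IndexError there).
def Pre_deal_whole_deck (hand_count : Int) (deck : List Int) : Prop :=
  1 ≤ hand_count ∨ deck = []
instance (hand_count : Int) (deck : List Int) : Decidable (Pre_deal_whole_deck hand_count deck) := by
  unfold Pre_deal_whole_deck; infer_instance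

def pvWitness_deal_whole_deck : Int × List Int := (3, [1, 2, 3, 4, 5, 6, 7])

def Spec_deal_whole_deck (hand_count : Int) (deck : List Int) (out : List (List Int)) : Prop :=
  out = deal_whole_deck_alt hand_count deck
instance (hand_count : Int) (deck : List Int) (out : List (List Int)) : Decidable (Spec_deal_whole_deck hand_count deck out) := by
  unfold Spec_deal_whole_deck; infer_instance

-- ===== CLAIM (what is proved, stated in full; the proofs are below) =====
def Claim_equal_deal_whole_deck : Prop := ∀ (hand_count : Int) (deck : List Int), Dom_deal_whole_deck hand_count deck → Pre_deal_whole_deck hand_count deck → Spec_deal_whole_deck hand_count deck (deal_whole_deck hand_count deck)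

-- ===== LEMMAS AND PROOFS =====

-- every n-th element of xs starting at offset j (what deck[j::n] selects for n > 0)
def strideGo (n : Nat) : List Int → Nat → List Int
  | [], _ => []
  | c :: r, 0 => c :: strideGo n r (n - 1)
  | _ :: r, j + 1 => strideGo n r j

-- (k - p) mod n, written without mod for p, k < n
def dealOff (n p k : Nat) : Nat := if p ≤ k then k - p else k + n - p

lemma strideGo_eq_nil_of_le (n : Nat) : ∀ (xs : List Int) (j : Nat), xs.length ≤ j → strideGo n xs j = [] := by
  intro xs
  induction xs with
  | nil => intro j _; rfl
  | cons c r ih =>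
      intro j hj
      match j, hj with
      | j + 1, hj => exact ih j (by simpa using hj)

lemma strideGo_getElem? (n : Nat) (hn : 0 < n) :
    ∀ (xs : List Int) (j k : Nat), (strideGo n xs j)[k]? = xs[j + n * k]? := by
  intro xs
  induction xs with
  | nil => intro j k; simp [strideGo]
  | cons c r ih =>
      intro j k
      match j with
      | 0 =>
          match k with
          | 0 => simp [strideGo]
          | k + 1 =>
              have h1 : (strideGo n (c :: r) 0)[k + 1]? = (strideGo n r (n - 1))[k]? := by
                simp [strideGo]
              rw [h1, ih (n - 1) k]
              rw [Nat.mul_succ, show 0 + (n * k + n) = ((n - 1) + n * k) + 1 by omega]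
              simp
      | j + 1 =>
          have h1 : (strideGo n (c :: r) (j + 1))[k]? = (strideGo n r j)[k]? := by
            simp [strideGo]
          rw [h1, ih j k, show j + 1 + n * k = (j + n * k) + 1 by omega]
          simp

lemma lt_ceil_iff (n m k : Nat) (hn : 0 < n) : k < (m + n - 1) / n ↔ n * k < m := by
  have h1 : (m + n - 1) / n < k + 1 ↔ m + n - 1 < (k + 1) * n := Nat.div_lt_iff_lt_mul hn
  have h2 : (k + 1) * n = n * k + n := by ring
  rw [h2] at h1
  generalize hc : (m + n - 1) / n = c at h1 ⊢
  generalize ht : n * k = t at h1 ⊢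
  omega

-- deck[j::n] (positive step n) is exactly strideGo n deck j
lemma slice?_stride (xs : List Int) (j n : Nat) (hn : 0 < n) :
    PySem.List.slice? xs (some (j : Int)) none (n : Int) = some (strideGo n xs j) := by
  have hn' : ((n : Int)) ≠ 0 := by exact_mod_cast hn.ne'
  have hnlt : ¬ ((n : Int) < 0) := not_lt.mpr (Int.natCast_nonneg n)
  have hj : ¬ ((j : Int) < 0) := not_lt.mpr (Int.natCast_nonneg j)
  have hn0 : (0 : Int) < (n : Int) := by exact_mod_cast hn
  simp only [PySem.List.slice?, PySem.List.sliceIndices, if_neg hn', if_neg hnlt, if_neg hj,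
    if_pos hn0]
  by_cases hjl : xs.length ≤ j
  · have hmin : min (j : Int) (xs.length : Int) = (xs.length : Int) := by
      simp; exact_mod_cast hjl
    rw [hmin, if_neg (lt_irrefl _), strideGo_eq_nil_of_le n xs j hjl]
    simp
  · push Not at hjl
    have hmin : min (j : Int) (xs.length : Int) = (j : Int) := by
      simp; omega
    rw [hmin, if_pos (by exact_mod_cast hjl)]
    have hcnt : (((xs.length : Int) - (j : Int) + (n : Int) - 1) / (n : Int)).toNat
        = ((xs.length - j) + n - 1) / n := by
      rw [show ((xs.length : Int) - (j : Int) + (n : Int) - 1) = (((xs.length - j) + n - 1 : Nat) : Int) by omega]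
      rw [← Int.natCast_div, Int.toNat_natCast]
    rw [hcnt]
    congr 1
    set cnt := ((xs.length - j) + n - 1) / n with hc
    have hlt : ∀ k : Nat, k < cnt ↔ j + n * k < xs.length := by
      intro k
      rw [hc, lt_ceil_iff _ _ _ hn]
      omega
    have hfm : ∀ k ∈ List.range cnt, xs[((j : Int) + (n : Int) * (k : Int)).toNat]? = some (xs.getD (j + n * k) 0) := by
      intro k hk
      rw [List.mem_range] at hk
      have hin : j + n * k < xs.length := (hlt k).mp hk
      rw [show ((j : Int) + (n : Int) * (k : Int)).toNat = j + n * k by omega]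
      rw [List.getElem?_eq_getElem hin, List.getD_eq_getElem _ _ hin]
    rw [List.filterMap_congr hfm]
    rw [show (fun k => some (xs.getD (j + n * k) 0)) = some ∘ (fun k => xs.getD (j + n * k) 0) from rfl,
      List.filterMap_eq_map]
    apply List.ext_getElem?
    intro k
    rw [strideGo_getElem? n hn xs j k, List.getElem?_map]
    by_cases hk : k < cnt
    · rw [List.getElem?_range hk]
      simp only [Option.map_some]
      rw [List.getElem?_eq_getElem ((hlt k).mp hk), List.getD_eq_getElem _ _ ((hlt k).mp hk)]
    · rw [List.getElem?_eq_none (by simpa using not_lt.mp hk)]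
      rw [List.getElem?_eq_none (by simpa using not_lt.mp ((hlt k).not.mp hk))]
      simp

lemma mod_succ_eq (n p : Nat) (hp : p < n) : (p + 1) % n = if p + 1 = n then 0 else p + 1 := by
  split_ifs with h
  · simp [h]
  · exact Nat.mod_eq_of_lt (by omega)

lemma off_self (n p : Nat) (hp : p < n) : dealOff n ((p + 1) % n) p = n - 1 := by
  rw [mod_succ_eq n p hp]
  unfold dealOff
  split_ifs <;> omega

lemma off_step (n p k : Nat) (hp : p < n) (hk : k < n) (hne : k ≠ p) :
    dealOff n ((p + 1) % n) k = dealOff n p k - 1 ∧ 0 < dealOff n p k := by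
  rw [mod_succ_eq n p hp]
  unfold dealOff
  split_ifs <;> omega

-- A's while-loop: hand k of the result is hands[k] followed by the stride of deck
-- starting at offset (k - ptmp) mod n
lemma loop_char (n : Nat) (hn : 0 < n) :
    ∀ (deck : List Int) (hands : List (List Int)) (p : Nat), hands.length = n → p < n →
      dealWholeDeckLoop (n : Int) hands (p : Int) deck
        = hands.mapIdx (fun k h => h ++ strideGo n deck (dealOff n p k)) := by
  intro deck
  induction deck with
  | nil =>
      intro hands p hh hp
      simp only [dealWholeDeckLoop, strideGo, List.append_nil]
      rw [List.mapIdx_eq_zipIdx_map]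
      simp
  | cons c rest ih =>
      intro hands p hh hp
      have hplen : p < hands.length := by omega
      have hmod : PySem.Int.mod ((p : Int) + 1) (n : Int) = (((p + 1) % n : Nat) : Int) := by
        rw [show ((p : Int) + 1) = (((p + 1 : Nat)) : Int) by push_cast; ring, PySem.Int.mod_natCast]
      have hget : PySem.List.pyGetD hands (p : Int) [] = hands[p] := by
        rw [PySem.List.pyGetD_natCast, List.getD_eq_getElem _ _ hplen]
      have hstep : dealWholeDeckLoop (n : Int) hands (p : Int) (c :: rest)
          = dealWholeDeckLoop (n : Int) (hands.set p (hands[p] ++ [c])) (((p + 1) % n : Nat) : Int) rest := by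
        simp only [dealWholeDeckLoop, hmod, hget, PySem.List.pySetD_natCast]
      rw [hstep, ih (hands.set p (hands[p] ++ [c])) ((p + 1) % n) (by simpa using hh) (Nat.mod_lt _ hn)]
      apply List.ext_getElem
      · simp
      · intro k h1 h2
        simp only [List.getElem_mapIdx, List.getElem_set]
        have hkn : k < n := by simpa [hh] using (by simpa using h2 : k < hands.length)
        by_cases hkp : k = p
        · subst hkp
          rw [if_pos rfl, off_self n k hp]
          have : dealOff n k k = 0 := by unfold dealOff; simp
          rw [this]
          simp [strideGo]
        · rw [if_neg (fun h => hkp h.symm)]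
          obtain ⟨he, hpos⟩ := off_step n p k hp hkn hkp
          rw [he]
          congr 1
          rw [show dealOff n p k = (dealOff n p k - 1) + 1 by omega]
          simp [strideGo]

-- ===== VERDICT (by name: the statement is the Claim_ definition above) =====
theorem deal_whole_deck_spec : Claim_equal_deal_whole_deck := by
  intro hc deck _ hpre
  unfold Spec_deal_whole_deck
  by_cases h1 : 1 ≤ hc
  · set n : Nat := hc.toNat with hndef
    have hn : 0 < n := by omega
    have hcast : hc = (n : Int) := by omega
    rw [hcast]
    unfold deal_whole_deck deal_whole_deck_alt
    have hlen : ((PySem.List.pyRange 0 (n : Int) 1).map (fun _ => ([] : List Int))).length = n := by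
      simp [PySem.List.length_pyRange_one]
    have hmain := loop_char n hn deck ((PySem.List.pyRange 0 (n : Int) 1).map (fun _ => ([] : List Int))) 0 hlen hn
    rw [Nat.cast_zero] at hmain
    rw [hmain]
    apply List.ext_getElem
    · simp [PySem.List.length_pyRange_one]
    · intro k hk1 hk2
      have hkn : k < n := by
        simpa [PySem.List.length_pyRange_one] using hk2
      have hkr : k < (PySem.List.pyRange 0 (n : Int) 1).length := by
        simpa [PySem.List.length_pyRange_one] using hkn
      simp only [List.getElem_mapIdx, List.getElem_map]
      rw [PySem.List.getElem_pyRange_one]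
      rw [show ((0 : Int) + (k : Int)) = ((k : Nat) : Int) by omega]
      rw [slice?_stride deck k n hn]
      have hoff : dealOff n 0 k = k := by unfold dealOff; simp
      rw [hoff]
      simp
  · have hdeck : deck = [] := hpre.resolve_left h1
    subst hdeck
    have hnil : PySem.List.pyRange 0 hc 1 = [] := PySem.List.pyRange_one_eq_nil (by omega)
    unfold deal_whole_deck deal_whole_deck_alt
    rw [hnil]
    simp [dealWholeDeckLoop]
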